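-- pv_equiv track=rewrite | github.com/sumwor/matching_pennies | python/matchpennies/choice_prediction.py | choice_counting
-- ===== SOURCE A (Python) =====
-- def choice_counting(choiceHistory, num):
--
--     leftCount=0
--     rightCount=0
--
--     if num==0:
--         for i in range(len(choiceHistory)):
--             if choiceHistory[i] == 0:
--                 leftCount+=1
--             else:
--                 rightCount+=1
--     else:
--         comb=choiceHistory[-num:]
--
--
--         for i in range(len(choiceHistory)-num):
--             if choiceHistory[i:i+num] == comb:
--                 if choiceHistory[i+num] == 0:
--                     leftCount+=1
--                 else:
--                     rightCount+=1
--
--     return leftCount, rightCount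
-- ===== SOURCE B (Python) =====
-- def choice_counting(choiceHistory, num):
--     n = len(choiceHistory)
--     if num == 0:
--         left = choiceHistory.count(0)
--         return left, n - left
--     # one pass building a tally keyed by (window, next-is-zero), then two lookups
--     counts = {}
--     for i in range(n - num):
--         key = (tuple(choiceHistory[i:i + num]), choiceHistory[i + num] == 0)
--         counts[key] = counts.get(key, 0) + 1
--     comb = tuple(choiceHistory[-num:])
--     return counts.get((comb, True), 0), counts.get((comb, False), 0)
-- ===== Notes on version B (the rewrite author's own statement) =====
-- stated objective: alternative
-- what changed: A compares each window against the target pattern and branches to two running counters; B makes one pass building a dictionary keyed by (window, next-choice-is-zero) with occurrence counts and then answers with two dictionary lookups.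
import Mathlib
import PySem

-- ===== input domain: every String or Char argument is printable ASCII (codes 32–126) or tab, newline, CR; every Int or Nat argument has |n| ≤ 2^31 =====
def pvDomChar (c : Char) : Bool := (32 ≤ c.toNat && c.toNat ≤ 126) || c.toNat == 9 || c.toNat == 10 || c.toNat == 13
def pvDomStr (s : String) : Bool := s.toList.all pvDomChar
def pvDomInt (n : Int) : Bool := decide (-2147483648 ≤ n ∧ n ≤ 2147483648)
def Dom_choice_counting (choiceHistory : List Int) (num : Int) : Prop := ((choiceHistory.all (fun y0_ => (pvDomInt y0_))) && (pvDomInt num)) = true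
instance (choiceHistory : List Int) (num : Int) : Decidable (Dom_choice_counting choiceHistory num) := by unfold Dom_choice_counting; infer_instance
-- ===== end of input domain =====

-- B replaces A's per-position slice-compare-then-branch tally with one pass that builds a
-- (window, next-is-zero) counter dictionary and reads the two answers off with two lookups
-- (objective: alternative; same asymptotic cost).

-- ===== PORT A =====
def choice_counting (choiceHistory : List Int) (num : Int) : Int × Int :=
  if num == 0 then
    (PySem.List.pyRange 0 (choiceHistory.length : Int) 1).foldl
      (fun (s : Int × Int) i =>
        if PySem.List.pyGetD choiceHistory i 0 == 0 then (s.1 + 1, s.2) else (s.1, s.2 + 1))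
      (0, 0)
  else
    let comb := PySem.List.slice choiceHistory (some (-num)) none
    (PySem.List.pyRange 0 ((choiceHistory.length : Int) - num) 1).foldl
      (fun (s : Int × Int) i =>
        if PySem.List.slice choiceHistory (some i) (some (i + num)) == comb then
          if PySem.List.pyGetD choiceHistory (i + num) 0 == 0 then (s.1 + 1, s.2)
          else (s.1, s.2 + 1)
        else s)
      (0, 0)

-- ===== PORT B =====
def choice_counting_alt (choiceHistory : List Int) (num : Int) : Int × Int :=
  let n : Int := choiceHistory.length
  if num == 0 then
    let left : Int := PySem.List.count choiceHistory 0
    (left, n - left)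
  else
    let counts := (PySem.List.pyRange 0 (n - num) 1).foldl
      (fun (d : PySem.Dict (List Int × Bool) Int) i =>
        let key := (PySem.List.slice choiceHistory (some i) (some (i + num)),
                    PySem.List.pyGetD choiceHistory (i + num) 0 == 0)
        d.insert key (d.getD key 0 + 1))
      PySem.Dict.empty
    let comb := PySem.List.slice choiceHistory (some (-num)) none
    (counts.getD (comb, true) 0, counts.getD (comb, false) 0)

-- ===== PRECONDITION & SPEC =====
-- Pre_ excludes exactly the inputs on which Python A raises IndexError (num < -len(choiceHistory)).
def Pre_choice_counting (choiceHistory : List Int) (num : Int) : Prop :=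
  -(choiceHistory.length : Int) ≤ num
instance (choiceHistory : List Int) (num : Int) : Decidable (Pre_choice_counting choiceHistory num) := by unfold Pre_choice_counting; infer_instance
def pvWitness_choice_counting : List Int × Int := ([0, 1, 0, 1], 1)

def Spec_choice_counting (choiceHistory : List Int) (num : Int) (out : Int × Int) : Prop := out = choice_counting_alt choiceHistory num
instance (choiceHistory : List Int) (num : Int) (out : Int × Int) : Decidable (Spec_choice_counting choiceHistory num out) := by unfold Spec_choice_counting; infer_instance

-- ===== CLAIM (what is proved, stated in full; the proofs are below) =====
def Claim_equal_choice_counting : Prop := ∀ (choiceHistory : List Int) (num : Int), Dom_choice_counting choiceHistory num → Pre_choice_counting choiceHistory num → Spec_choice_counting choiceHistory num (choice_counting choiceHistory num)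

-- ===== LEMMAS AND PROOFS =====

-- A's num == 0 loop counts zeros on the left and everything else on the right.
theorem foldl_zero_tally (xs : List Int) (l r : Int) :
    xs.foldl (fun (s : Int × Int) x => if x == 0 then (s.1 + 1, s.2) else (s.1, s.2 + 1)) (l, r)
      = (l + (xs.count 0 : Int), r + ((xs.length : Int) - (xs.count 0 : Int))) := by
  induction xs generalizing l r with
  | nil => simp
  | cons a xs ih =>
    rw [List.foldl_cons]
    by_cases h : a = 0
    · rw [if_pos (by simp [h]), ih]
      simp [h, Prod.ext_iff]
      all_goals omega
    · rw [if_neg (by simp [h]), ih]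
      simp [List.count_cons, Prod.ext_iff]
      all_goals omega

-- A's pattern loop, generically: tally (c i && z i) left, (c i && !z i) right.
theorem foldl_match_tally (c z : Int → Bool) (L : List Int) (l r : Int) :
    L.foldl (fun (s : Int × Int) i =>
        if c i then (if z i then (s.1 + 1, s.2) else (s.1, s.2 + 1)) else s) (l, r)
      = (l + (L.countP (fun i => c i && z i) : Int),
         r + (L.countP (fun i => c i && !z i) : Int)) := by
  induction L generalizing l r with
  | nil => simp
  | cons a L ih =>
    rw [List.foldl_cons]
    by_cases hc : c a = true
    · by_cases hz : z a = true
      · rw [if_pos hc, if_pos hz, ih]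
        simp [hc, hz, Prod.ext_iff]
        all_goals omega
      · rw [if_pos hc, if_neg hz, ih]
        simp [hc, hz, Prod.ext_iff]
        all_goals omega
    · rw [if_neg hc, ih]
      simp [hc]

-- B's counter loop: the tally stored under key k is the number of positions with that key.
theorem foldl_counter_getD {κ : Type} [BEq κ] [LawfulBEq κ] [DecidableEq κ]
    (key : Int → κ) (L : List Int) (d : PySem.Dict κ Int) (k : κ) :
    (L.foldl (fun (d : PySem.Dict κ Int) i =>
        d.insert (key i) (d.getD (key i) 0 + 1)) d).getD k 0
      = d.getD k 0 + (L.countP (fun i => key i == k) : Int) := by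
  induction L generalizing d with
  | nil => simp
  | cons a L ih =>
    rw [List.foldl_cons, ih, PySem.Dict.getD_insert]
    by_cases h : k = key a
    · subst h
      simp
      omega
    · simp [if_neg h, beq_iff_eq, Ne.symm h]

theorem beq_pair_true (x y : List Int) (b : Bool) : ((x, b) == (y, true)) = (x == y && b) := by
  cases b <;> simp

theorem beq_pair_false (x y : List Int) (b : Bool) : ((x, b) == (y, false)) = (x == y && !b) := by
  cases b <;> simp

-- ===== VERDICT (by name: the statement is the Claim_ definition above) =====
theorem choice_counting_spec : Claim_equal_choice_counting := by
  intro ch num _ _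
  unfold Spec_choice_counting choice_counting choice_counting_alt
  by_cases h0 : num == 0
  · simp only [h0, if_true]
    rw [PySem.List.foldl_pyRange_zero_pyGetD' ch 0
      (fun (s : Int × Int) x => if x == 0 then (s.1 + 1, s.2) else (s.1, s.2 + 1)) (0, 0)]
    rw [foldl_zero_tally]
    simp [PySem.List.count_eq]
  · simp only [h0]
    rw [foldl_match_tally
        (fun i => PySem.List.slice ch (some i) (some (i + num)) == PySem.List.slice ch (some (-num)) none)
        (fun i => PySem.List.pyGetD ch (i + num) 0 == 0)]
    rw [foldl_counter_getD
        (fun i => (PySem.List.slice ch (some i) (some (i + num)), PySem.List.pyGetD ch (i + num) 0 == 0))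
        (PySem.List.pyRange 0 ((ch.length : Int) - num) 1) PySem.Dict.empty
        (PySem.List.slice ch (some (-num)) none, true),
      foldl_counter_getD
        (fun i => (PySem.List.slice ch (some i) (some (i + num)), PySem.List.pyGetD ch (i + num) 0 == 0))
        (PySem.List.pyRange 0 ((ch.length : Int) - num) 1) PySem.Dict.empty
        (PySem.List.slice ch (some (-num)) none, false)]
    simp [beq_pair_true, beq_pair_false]
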